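-- pv_equiv track=rewrite | github.com/flock957/render-analyze | scripts/capture_screenshots.py | _pick_thread_entries
-- ===== SOURCE A (Python) =====
-- def _pick_thread_entries(entries, preferred_tokens, limit=1):
--     if not entries:
--         return []
--     picked = []
--     seen = set()
--     for token in [str(token or "").strip().lower() for token in preferred_tokens]:
--         if not token:
--             continue
--         for entry in entries:
--             name = str(entry.get("name", "")).strip()
--             key = (name, entry.get("tid"))
--             if key in seen:
--                 continue
--             if token in name.lower():
--                 picked.append(entry)
--                 seen.add(key)
--                 if len(picked) >= limit:
--                     return picked
--     for entry in entries:
--         name = str(entry.get("name", "")).strip()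
--         key = (name, entry.get("tid"))
--         if not name or key in seen:
--             continue
--         picked.append(entry)
--         seen.add(key)
--         if len(picked) >= limit:
--             return picked
--     return picked
-- ===== SOURCE B (Python) =====
-- def _pick_thread_entries(entries, preferred_tokens, limit=1):
--     toks = [t for t in (str(t or "").strip().lower() for t in preferred_tokens) if t]
--     scored = []
--     for entry in entries:
--         name = str(entry.get("name", "")).strip()
--         if not name:
--             continue
--         low = name.lower()
--         p = len(toks)
--         for i, t in enumerate(toks):
--             if t in low:
--                 p = i
--                 break
--         scored.append((p, name, entry.get("tid"), entry))
--     out = []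
--     seen = set()
--     for p, name, tid, entry in sorted(scored, key=lambda s: s[0]):
--         if (name, tid) in seen:
--             continue
--         seen.add((name, tid))
--         out.append(entry)
--         if len(out) == limit:
--             break
--     return out
-- ===== Notes on version B (the rewrite author's own statement) =====
-- stated objective: faster
-- what changed: Replaces A's token-major two-phase scanning (one full pass over entries per preferred token, then a fallback pass, with a shared seen-set and mid-loop early returns) by a single entry-major scoring pass (priority = index of first matching normalized token), one stable sort by priority, and one dedup-by-(name,tid) scan truncated at limit; names are stripped/lowered once per entry instead of once per (token, entry) pair.
import Mathlib
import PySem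

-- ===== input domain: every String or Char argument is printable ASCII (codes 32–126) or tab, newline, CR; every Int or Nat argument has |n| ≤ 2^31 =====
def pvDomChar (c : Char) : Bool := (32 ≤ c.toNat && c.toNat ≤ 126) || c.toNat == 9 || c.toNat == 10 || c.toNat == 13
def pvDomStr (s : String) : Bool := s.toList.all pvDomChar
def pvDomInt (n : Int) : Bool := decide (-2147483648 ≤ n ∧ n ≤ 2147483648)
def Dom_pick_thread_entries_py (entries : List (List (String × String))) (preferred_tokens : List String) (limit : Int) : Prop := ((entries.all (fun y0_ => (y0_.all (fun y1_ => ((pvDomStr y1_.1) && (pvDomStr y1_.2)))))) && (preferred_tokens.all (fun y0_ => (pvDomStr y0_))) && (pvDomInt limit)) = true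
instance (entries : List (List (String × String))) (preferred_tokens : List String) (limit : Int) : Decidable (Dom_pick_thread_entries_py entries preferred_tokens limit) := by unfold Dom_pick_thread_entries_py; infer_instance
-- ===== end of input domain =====

-- B replaces A's token-major two-phase rescanning by a single scoring pass over the
-- entries plus one stable sort by token priority and a dedup scan (objective: faster,
-- measured; the return value is proved identical for limit >= 1).

-- shared field accessors (used by both ports)
def pvName (e : List (String × String)) : String :=
  PySem.Str.strip (PySem.Dict.getD (PySem.Dict.mk e) "name" "")
def pvTid (e : List (String × String)) : Option String :=
  PySem.Dict.get? (PySem.Dict.mk e) "tid"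
def pvNorm (t : String) : String := PySem.Str.lower (PySem.Str.strip t)

-- ===== PORT A =====
-- inner `for entry in entries` of the token phase; Bool flag = early `return picked`
def pvA_inner (limit : Int) (token : String) :
    List (List (String × String)) → List (List (String × String)) →
    PySem.Set (String × Option String) →
    (List (List (String × String)) × PySem.Set (String × Option String) × Bool)
  | [], picked, seen => (picked, seen, false)
  | e :: rest, picked, seen =>
    let name := pvName e
    let key := (name, pvTid e)
    if PySem.Set.contains seen key then pvA_inner limit token rest picked seen
    else if PySem.Str.isIn token (PySem.Str.lower name) then
      let picked' := picked ++ [e]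
      let seen' := PySem.Set.add seen key
      if limit ≤ (picked'.length : Int) then (picked', seen', true)
      else pvA_inner limit token rest picked' seen'
    else pvA_inner limit token rest picked seen

-- outer `for token in [...]` loop (skipping empty normalized tokens)
def pvA_outer (limit : Int) (entries : List (List (String × String))) :
    List String → List (List (String × String)) →
    PySem.Set (String × Option String) →
    (List (List (String × String)) × PySem.Set (String × Option String) × Bool)
  | [], picked, seen => (picked, seen, false)
  | t :: ts, picked, seen =>
    if t = "" then pvA_outer limit entries ts picked seen
    else
      let r := pvA_inner limit t entries picked seen
      if r.2.2 then r else pvA_outer limit entries ts r.1 r.2.1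

-- trailing fallback `for entry in entries` loop
def pvA_fill (limit : Int) :
    List (List (String × String)) → List (List (String × String)) →
    PySem.Set (String × Option String) → List (List (String × String))
  | [], picked, _ => picked
  | e :: rest, picked, seen =>
    let name := pvName e
    let key := (name, pvTid e)
    if name = "" ∨ PySem.Set.contains seen key then pvA_fill limit rest picked seen
    else
      let picked' := picked ++ [e]
      if limit ≤ (picked'.length : Int) then picked'
      else pvA_fill limit rest picked' (PySem.Set.add seen key)

def pick_thread_entries_py (entries : List (List (String × String))) (preferred_tokens : List String) (limit : Int) : List (List (String × String)) :=
  if entries = [] then []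
  else
    let r := pvA_outer limit entries (preferred_tokens.map pvNorm) [] PySem.Set.empty
    if r.2.2 then r.1 else pvA_fill limit entries r.1 r.2.1

-- ===== PORT B =====
-- p = index of first normalized token contained in the lowered name, else len(toks)
def pvB_score : List String → String → Nat
  | [], _ => 0
  | t :: ts, low => if PySem.Str.isIn t low then 0 else pvB_score ts low + 1

-- the `scored` list: (priority, stripped name, tid, entry) for entries with a name
def pvB_scored (toks : List String) :
    List (List (String × String)) →
    List (Nat × String × Option String × List (String × String))
  | [] => []
  | e :: rest =>
    let name := pvName e
    if name = "" then pvB_scored toks rest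
    else (pvB_score toks (PySem.Str.lower name), name, pvTid e, e) :: pvB_scored toks rest

-- final scan over the sorted scored list: dedup by (name, tid), stop at limit
def pvB_emit (limit : Int) :
    List (Nat × String × Option String × List (String × String)) →
    List (List (String × String)) → PySem.Set (String × Option String) →
    List (List (String × String))
  | [], out, _ => out
  | (_, name, tid, e) :: rest, out, seen =>
    if PySem.Set.contains seen (name, tid) then pvB_emit limit rest out seen
    else
      let out' := out ++ [e]
      if (out'.length : Int) = limit then out'
      else pvB_emit limit rest out' (PySem.Set.add seen (name, tid))

def pick_thread_entries_py_alt (entries : List (List (String × String))) (preferred_tokens : List String) (limit : Int) : List (List (String × String)) :=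
  let toks := (preferred_tokens.map pvNorm).filter (fun t => t ≠ "")
  pvB_emit limit (PySem.List.sorted (pvB_scored toks entries) (fun s => s.1) false) [] PySem.Set.empty

-- ===== PRECONDITION & SPEC =====
-- Pre_ excludes limit < 1 (outside the natural domain of a positive result count), where
-- A's check-after-append still returns one entry while B returns all deduplicated entries.
def Pre_pick_thread_entries_py (entries : List (List (String × String))) (preferred_tokens : List String) (limit : Int) : Prop := 1 ≤ limit
instance (entries : List (List (String × String))) (preferred_tokens : List String) (limit : Int) : Decidable (Pre_pick_thread_entries_py entries preferred_tokens limit) := by unfold Pre_pick_thread_entries_py; infer_instance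

def pvWitness_pick_thread_entries_py : (List (List (String × String))) × List String × Int :=
  ([[("name", "alpha"), ("tid", "7")], [("name", "beta")]], ["Al"], 1)

def Spec_pick_thread_entries_py (entries : List (List (String × String))) (preferred_tokens : List String) (limit : Int) (out : List (List (String × String))) : Prop := out = pick_thread_entries_py_alt entries preferred_tokens limit
instance (entries : List (List (String × String))) (preferred_tokens : List String) (limit : Int) (out : List (List (String × String))) : Decidable (Spec_pick_thread_entries_py entries preferred_tokens limit out) := by unfold Spec_pick_thread_entries_py; infer_instance

-- ===== CLAIM (what is proved, stated in full; the proofs are below) =====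
def Claim_equal_pick_thread_entries_py : Prop := ∀ (entries : List (List (String × String))) (preferred_tokens : List String) (limit : Int), Dom_pick_thread_entries_py entries preferred_tokens limit → Pre_pick_thread_entries_py entries preferred_tokens limit → Spec_pick_thread_entries_py entries preferred_tokens limit (pick_thread_entries_py entries preferred_tokens limit)

-- ===== LEMMAS AND PROOFS =====

-- key of an entry, and whether a token matches it
def pvKey (e : List (String × String)) : String × Option String := (pvName e, pvTid e)
def pvMatch (t : String) (e : List (String × String)) : Bool :=
  PySem.Str.isIn t (PySem.Str.lower (pvName e))

theorem pvKey_eq (e : List (String × String)) : (pvName e, pvTid e) = pvKey e := rfl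

-- uncapped single token phase over list-represented seen: (picks, final seen)
def pvGrab (t : String) :
    List (List (String × String)) → List (String × Option String) →
    (List (List (String × String)) × List (String × Option String))
  | [], s => ([], s)
  | e :: r, s =>
    if pvKey e ∈ s then pvGrab t r s
    else if pvMatch t e then
      let p := pvGrab t r (pvKey e :: s)
      (e :: p.1, p.2)
    else pvGrab t r s

-- uncapped fallback phase
def pvFill :
    List (List (String × String)) → List (String × Option String) →
    (List (List (String × String)) × List (String × Option String))
  | [], s => ([], s)
  | e :: r, s =>
    if pvName e = "" ∨ pvKey e ∈ s then pvFill r s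
    else
      let p := pvFill r (pvKey e :: s)
      (e :: p.1, p.2)

-- uncapped token-major phases (A's phase 1 without the limit)
def pvGsT : List String → List (List (String × String)) → List (String × Option String) →
    (List (List (String × String)) × List (String × Option String))
  | [], _, s => ([], s)
  | t :: ts, es, s =>
    if t = "" then pvGsT ts es s
    else
      let g := pvGrab t es s
      let rest := pvGsT ts es g.2
      (g.1 ++ rest.1, rest.2)

-- the full uncapped run of A
def pvGs (ts : List String) (es : List (List (String × String))) (s : List (String × Option String)) :
    List (List (String × String)) :=
  (pvGsT ts es s).1 ++ (pvFill es (pvGsT ts es s).2).1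

-- uncapped dedup scan over scored tuples
def pvDk : List (Nat × String × Option String × List (String × String)) →
    List (String × Option String) →
    (List (List (String × String)) × List (String × Option String))
  | [], s => ([], s)
  | (_, n, i, e) :: r, s =>
    if (n, i) ∈ s then pvDk r s
    else
      let p := pvDk r ((n, i) :: s)
      (e :: p.1, p.2)


-- abbreviations used in lemma statements
-- (the scored tuples have type  Nat × String × Option String × List (String × String))

theorem pvSet_contains_iff (s : PySem.Set (String × Option String)) (k : String × Option String) :
    PySem.Set.contains s k = true ↔ k ∈ s := by
  simp [PySem.Set.contains]

theorem pvMatch_empty (t : String) (ht : t ≠ "") (e : List (String × String))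
    (h : pvName e = "") : pvMatch t e = false := by
  unfold pvMatch
  rw [h]
  have hlow : PySem.Str.lower "" = "" := by decide
  rw [hlow, Bool.eq_false_iff]
  intro hh
  exact ht (by simpa using (PySem.Str.isIn_iff_infix t "").mp hh)

-- ---- A side: the capped run computes a take of the uncapped run ----

theorem pvA_inner_spec (limit : Int) (t : String) :
    ∀ (es picked : List (List (String × String))) (seen : PySem.Set (String × Option String))
      (sG : List (String × Option String)),
      (∀ k, k ∈ seen ↔ k ∈ sG) → (picked.length : Int) < limit →
      ((pvA_inner limit t es picked seen).2.2 = true →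
        (pvA_inner limit t es picked seen).1 = (picked ++ (pvGrab t es sG).1).take limit.toNat ∧
        limit ≤ ((picked.length + (pvGrab t es sG).1.length : Nat) : Int)) ∧
      ((pvA_inner limit t es picked seen).2.2 = false →
        (pvA_inner limit t es picked seen).1 = picked ++ (pvGrab t es sG).1 ∧
        ((picked.length + (pvGrab t es sG).1.length : Nat) : Int) < limit ∧
        ∀ k, k ∈ (pvA_inner limit t es picked seen).2.1 ↔ k ∈ (pvGrab t es sG).2) := by
  intro es
  induction es with
  | nil =>
    intro picked seen sG hseen hlen
    refine ⟨fun h => by simp [pvA_inner] at h, fun _ => ?_⟩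
    simp only [pvA_inner, pvGrab]
    exact ⟨by simp, by simpa using hlen, hseen⟩
  | cons e r ih =>
    intro picked seen sG hseen hlen
    simp only [pvA_inner, pvGrab, pvKey_eq]
    have hseen' : ∀ k, k ∈ PySem.Set.add seen (pvKey e) ↔ k ∈ pvKey e :: sG := by
      intro k
      simp [PySem.Set.mem_add, hseen k, List.mem_cons, or_comm]
    by_cases hk : pvKey e ∈ sG
    · rw [if_pos ((pvSet_contains_iff seen _).mpr ((hseen _).mpr hk)), if_pos hk]
      exact ih picked seen sG hseen hlen
    · rw [if_neg (fun h => hk ((hseen _).mp ((pvSet_contains_iff seen _).mp h))), if_neg hk]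
      by_cases hm : pvMatch t e = true
      · have hm2 : PySem.Str.isIn t (PySem.Str.lower (pvName e)) = true := hm
        rw [if_pos hm2, if_pos hm]
        by_cases hcap : limit ≤ (((picked ++ [e]).length : Nat) : Int)
        · rw [if_pos hcap]
          refine ⟨fun _ => ⟨?_, ?_⟩, fun h => by simp at h⟩
          · have hlim : limit.toNat = picked.length + 1 := by
              simp only [List.length_append, List.length_cons, List.length_nil] at hcap
              omega
            have heq : picked ++ e :: (pvGrab t r (pvKey e :: sG)).1 =
                (picked ++ [e]) ++ (pvGrab t r (pvKey e :: sG)).1 := by simp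
            rw [heq, List.take_append_of_le_length (by simp [hlim]), hlim]
            have hlen1 : picked.length + 1 = (picked ++ [e]).length := by simp
            rw [hlen1, List.take_length]
          · simp only [List.length_append, List.length_cons, List.length_nil] at hcap ⊢
            push_cast at hcap ⊢
            omega
        · rw [if_neg hcap]
          have hlen' : ((picked ++ [e]).length : Int) < limit := by
            simp only [List.length_append, List.length_cons, List.length_nil] at hcap ⊢
            push_cast at hcap ⊢
            omega
          have hih := ih (picked ++ [e]) (PySem.Set.add seen (pvKey e)) (pvKey e :: sG) hseen' hlen'
          refine ⟨fun h => ?_, fun h => ?_⟩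
          · obtain ⟨h1, h2⟩ := hih.1 h
            refine ⟨by rw [h1]; simp, ?_⟩
            simp only [List.length_append, List.length_cons, List.length_nil] at h2 ⊢
            push_cast at h2 ⊢
            omega
          · obtain ⟨h1, h2, h3⟩ := hih.2 h
            refine ⟨by rw [h1]; simp, ?_, h3⟩
            simp only [List.length_append, List.length_cons, List.length_nil] at h2 ⊢
            push_cast at h2 ⊢
            omega
      · have hm2 : ¬ (PySem.Str.isIn t (PySem.Str.lower (pvName e)) = true) := hm
        rw [if_neg hm2, if_neg hm]
        exact ih picked seen sG hseen hlen

theorem pvA_fill_spec (limit : Int) :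
    ∀ (es picked : List (List (String × String))) (seen : PySem.Set (String × Option String))
      (sG : List (String × Option String)),
      (∀ k, k ∈ seen ↔ k ∈ sG) → (picked.length : Int) < limit →
      pvA_fill limit es picked seen = (picked ++ (pvFill es sG).1).take limit.toNat := by
  intro es
  induction es with
  | nil =>
    intro picked seen sG hseen hlen
    simp only [pvA_fill, pvFill]
    rw [List.append_nil, List.take_of_length_le (by omega)]
  | cons e r ih =>
    intro picked seen sG hseen hlen
    simp only [pvA_fill, pvFill, pvKey_eq]
    have hseen' : ∀ k, k ∈ PySem.Set.add seen (pvKey e) ↔ k ∈ pvKey e :: sG := by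
      intro k
      simp [PySem.Set.mem_add, hseen k, List.mem_cons, or_comm]
    by_cases h1 : pvName e = "" ∨ pvKey e ∈ sG
    · have h1' : pvName e = "" ∨ PySem.Set.contains seen (pvKey e) = true := by
        rcases h1 with h | h
        · exact Or.inl h
        · exact Or.inr ((pvSet_contains_iff seen _).mpr ((hseen _).mpr h))
      rw [if_pos h1', if_pos h1]
      exact ih picked seen sG hseen hlen
    · have h1' : ¬ (pvName e = "" ∨ PySem.Set.contains seen (pvKey e) = true) := by
        rintro (h | h)
        · exact h1 (Or.inl h)
        · exact h1 (Or.inr ((hseen _).mp ((pvSet_contains_iff seen _).mp h)))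
      rw [if_neg h1', if_neg h1]
      by_cases hcap : limit ≤ (((picked ++ [e]).length : Nat) : Int)
      · rw [if_pos hcap]
        have hlim : limit.toNat = picked.length + 1 := by
          simp only [List.length_append, List.length_cons, List.length_nil] at hcap
          omega
        have heq : picked ++ e :: (pvFill r (pvKey e :: sG)).1 =
            (picked ++ [e]) ++ (pvFill r (pvKey e :: sG)).1 := by simp
        rw [heq, List.take_append_of_le_length (by simp [hlim]), hlim]
        have hlen1 : picked.length + 1 = (picked ++ [e]).length := by simp
        rw [hlen1, List.take_length]
      · rw [if_neg hcap]
        rw [ih (picked ++ [e]) (PySem.Set.add seen (pvKey e)) (pvKey e :: sG) hseen'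
          (by simp only [List.length_append, List.length_cons, List.length_nil] at hcap ⊢; omega)]
        simp

theorem pvA_outer_spec (limit : Int) (entries : List (List (String × String))) :
    ∀ (ts : List String) (picked : List (List (String × String)))
      (seen : PySem.Set (String × Option String)) (sG : List (String × Option String)),
      (∀ k, k ∈ seen ↔ k ∈ sG) → (picked.length : Int) < limit →
      ((pvA_outer limit entries ts picked seen).2.2 = true →
        (pvA_outer limit entries ts picked seen).1 =
          (picked ++ (pvGsT ts entries sG).1).take limit.toNat ∧
        limit ≤ ((picked.length + (pvGsT ts entries sG).1.length : Nat) : Int)) ∧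
      ((pvA_outer limit entries ts picked seen).2.2 = false →
        (pvA_outer limit entries ts picked seen).1 = picked ++ (pvGsT ts entries sG).1 ∧
        ((picked.length + (pvGsT ts entries sG).1.length : Nat) : Int) < limit ∧
        ∀ k, k ∈ (pvA_outer limit entries ts picked seen).2.1 ↔ k ∈ (pvGsT ts entries sG).2) := by
  intro ts
  induction ts with
  | nil =>
    intro picked seen sG hseen hlen
    refine ⟨fun h => by simp [pvA_outer] at h, fun _ => ?_⟩
    simp only [pvA_outer, pvGsT]
    exact ⟨by simp, by simpa using hlen, hseen⟩
  | cons t ts ih =>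
    intro picked seen sG hseen hlen
    simp only [pvA_outer, pvGsT]
    by_cases ht : t = ""
    · rw [if_pos ht, if_pos ht]
      exact ih picked seen sG hseen hlen
    · rw [if_neg ht, if_neg ht]
      have hin := pvA_inner_spec limit t entries picked seen sG hseen hlen
      by_cases hdone : (pvA_inner limit t entries picked seen).2.2 = true
      · obtain ⟨h1, h2⟩ := hin.1 hdone
        rw [if_pos hdone]
        refine ⟨fun _ => ⟨?_, ?_⟩, fun h => by rw [hdone] at h; simp at h⟩
        · rw [h1]
          have hstep :
              ((picked ++ (pvGrab t entries sG).1) ++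
                (pvGsT ts entries (pvGrab t entries sG).2).1).take limit.toNat =
              (picked ++ (pvGrab t entries sG).1).take limit.toNat :=
            List.take_append_of_le_length (by
              simp only [List.length_append] at h2 ⊢
              push_cast at h2 ⊢
              omega)
          rw [show picked ++ ((pvGrab t entries sG).1 ++
              (pvGsT ts entries (pvGrab t entries sG).2).1) =
              (picked ++ (pvGrab t entries sG).1) ++
              (pvGsT ts entries (pvGrab t entries sG).2).1 from by simp, hstep]
        · simp only [List.length_append] at h2 ⊢
          push_cast at h2 ⊢
          omega
      · have hfalse : (pvA_inner limit t entries picked seen).2.2 = false := by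
          simpa using hdone
        obtain ⟨h1, h2, h3⟩ := hin.2 hfalse
        rw [if_neg hdone]
        have hih := ih (pvA_inner limit t entries picked seen).1
          (pvA_inner limit t entries picked seen).2.1 (pvGrab t entries sG).2 h3
          (by rw [h1]; simpa using h2)
        refine ⟨fun h => ?_, fun h => ?_⟩
        · obtain ⟨g1, g2⟩ := hih.1 h
          rw [h1] at g2
          constructor
          · rw [g1, h1]
            congr 1
            simp
          · simp only [List.length_append] at g2 ⊢
            push_cast at g2 ⊢
            omega
        · obtain ⟨g1, g2, g3⟩ := hih.2 h
          rw [h1] at g2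
          refine ⟨by rw [g1, h1]; simp, ?_, g3⟩
          simp only [List.length_append] at g2 ⊢
          push_cast at g2 ⊢
          omega

theorem pvGsT_nil (ts : List String) (s : List (String × Option String)) :
    pvGsT ts [] s = ([], s) := by
  induction ts with
  | nil => rfl
  | cons t ts ih =>
    simp only [pvGsT]
    by_cases h : t = ""
    · rw [if_pos h]
      exact ih
    · rw [if_neg h]
      simp [pvGrab, ih]

theorem pvA_run (entries : List (List (String × String))) (pts : List String) (limit : Int)
    (hl : 1 ≤ limit) :
    pick_thread_entries_py entries pts limit =
      (pvGs (pts.map pvNorm) entries []).take limit.toNat := by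
  unfold pick_thread_entries_py
  by_cases hnil : entries = []
  · rw [if_pos hnil, hnil]
    unfold pvGs
    rw [pvGsT_nil]
    simp [pvFill]
  · rw [if_neg hnil]
    have hempty : ∀ k, k ∈ (PySem.Set.empty : PySem.Set (String × Option String)) ↔
        k ∈ ([] : List (String × Option String)) := by
      intro k
      simp [PySem.Set.empty]
    have hout := pvA_outer_spec limit entries (pts.map pvNorm) [] PySem.Set.empty [] hempty
      (by simpa using hl)
    by_cases hdone : (pvA_outer limit entries (pts.map pvNorm) [] PySem.Set.empty).2.2 = true
    · obtain ⟨h1, h2⟩ := hout.1 hdone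
      rw [if_pos hdone, h1]
      unfold pvGs
      simp only [List.nil_append]
      have hstep : ((pvGsT (pts.map pvNorm) entries []).1 ++
          (pvFill entries (pvGsT (pts.map pvNorm) entries []).2).1).take limit.toNat =
          (pvGsT (pts.map pvNorm) entries []).1.take limit.toNat :=
        List.take_append_of_le_length (by simp at h2; omega)
      rw [hstep]
    · have hfalse : (pvA_outer limit entries (pts.map pvNorm) [] PySem.Set.empty).2.2 = false := by
        simpa using hdone
      obtain ⟨h1, h2, h3⟩ := hout.2 hfalse
      rw [if_neg hdone]
      rw [pvA_fill_spec limit entries (pvA_outer limit entries (pts.map pvNorm) [] PySem.Set.empty).1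
        (pvA_outer limit entries (pts.map pvNorm) [] PySem.Set.empty).2.1
        (pvGsT (pts.map pvNorm) entries []).2 h3 (by rw [h1]; simpa using h2), h1]
      unfold pvGs
      simp

-- ---- B side: the capped emit computes a take of the uncapped dedup scan ----

theorem pvB_emit_spec (limit : Int) :
    ∀ (l : List (Nat × String × Option String × List (String × String)))
      (out : List (List (String × String))) (seen : PySem.Set (String × Option String))
      (sG : List (String × Option String)),
      (∀ k, k ∈ seen ↔ k ∈ sG) → (out.length : Int) < limit →
      pvB_emit limit l out seen = (out ++ (pvDk l sG).1).take limit.toNat := by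
  intro l
  induction l with
  | nil =>
    intro out seen sG hseen hlen
    simp only [pvB_emit, pvDk]
    rw [List.append_nil, List.take_of_length_le (by omega)]
  | cons y l ih =>
    obtain ⟨p, n, i, e⟩ := y
    intro out seen sG hseen hlen
    simp only [pvB_emit, pvDk]
    have hseen' : ∀ k, k ∈ PySem.Set.add seen (n, i) ↔ k ∈ (n, i) :: sG := by
      intro k
      simp [PySem.Set.mem_add, hseen k, List.mem_cons, or_comm]
    by_cases h1 : (n, i) ∈ sG
    · rw [if_pos ((pvSet_contains_iff seen _).mpr ((hseen _).mpr h1)), if_pos h1]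
      exact ih out seen sG hseen hlen
    · rw [if_neg (fun h => h1 ((hseen _).mp ((pvSet_contains_iff seen _).mp h))), if_neg h1]
      by_cases hcap : (((out ++ [e]).length : Nat) : Int) = limit
      · rw [if_pos hcap]
        have hlim : limit.toNat = out.length + 1 := by
          simp only [List.length_append, List.length_cons, List.length_nil] at hcap
          omega
        have heq : out ++ e :: (pvDk l ((n, i) :: sG)).1 =
            (out ++ [e]) ++ (pvDk l ((n, i) :: sG)).1 := by simp
        rw [heq, List.take_append_of_le_length (by simp [hlim]), hlim]
        have hlen1 : out.length + 1 = (out ++ [e]).length := by simp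
        rw [hlen1, List.take_length]
      · rw [if_neg hcap]
        rw [ih (out ++ [e]) (PySem.Set.add seen (n, i)) ((n, i) :: sG) hseen'
          (by simp only [List.length_append, List.length_cons, List.length_nil] at hcap ⊢; omega)]
        simp

theorem pvB_run (entries : List (List (String × String))) (pts : List String) (limit : Int)
    (hl : 1 ≤ limit) :
    pick_thread_entries_py_alt entries pts limit =
      ((pvDk (PySem.List.sorted
          (pvB_scored ((pts.map pvNorm).filter (fun t => t ≠ "")) entries)
          (fun s => s.1) false) []).1).take limit.toNat := by
  unfold pick_thread_entries_py_alt
  rw [pvB_emit_spec limit _ [] PySem.Set.empty []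
    (by intro k; simp [PySem.Set.empty]) (by simpa using hl)]
  simp

-- ---- stable sort by the Nat first component, as insertion sort ----

theorem pvSorted_snoc {β : Type} (xs : List (Nat × β)) (x : Nat × β) :
    PySem.List.sorted (xs ++ [x]) (fun y => y.1) false =
      PySem.List.insertBy (fun a b => decide (a.1 < b.1)) x
        (PySem.List.sorted xs (fun y => y.1) false) := by
  rw [PySem.List.sorted_eq_foldl_insertBy, PySem.List.sorted_eq_foldl_insertBy, List.foldl_append]
  rfl

theorem pvInsertBy_append {β : Type} (before : β → β → Bool) (x : β) (A S : List β)
    (h : ∀ a ∈ A, before x a = false) :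
    PySem.List.insertBy before x (A ++ S) = A ++ PySem.List.insertBy before x S := by
  induction A with
  | nil => simp
  | cons a A ih =>
    have ha := h a (by simp)
    simp only [List.cons_append, PySem.List.insertBy, ha]
    simp [ih (fun b hb => h b (by simp [hb]))]

theorem pvInsertBy_front {β : Type} (before : β → β → Bool) (x : β) (S : List β)
    (h : ∀ y ∈ S, before x y = true) :
    PySem.List.insertBy before x S = x :: S := by
  cases S with
  | nil => rfl
  | cons y ys => simp [PySem.List.insertBy, h y (by simp)]

theorem pvSorted_decomp {β : Type} (xs : List (Nat × β)) :
    PySem.List.sorted xs (fun y => y.1) false =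
      xs.filter (fun y => y.1 == 0) ++
        PySem.List.sorted (xs.filter (fun y => !(y.1 == 0))) (fun y => y.1) false := by
  induction xs using List.reverseRecOn with
  | nil => rfl
  | append_singleton xs x ih =>
    rw [pvSorted_snoc, ih, List.filter_append, List.filter_append]
    by_cases hx : x.1 = 0
    · have hf0 : List.filter (fun y => y.1 == 0) [x] = [x] := by simp [hx]
      have hfn : List.filter (fun y => !(y.1 == 0)) [x] = [] := by simp [hx]
      rw [hf0, hfn, List.append_nil,
        pvInsertBy_append _ _ _ _ (by
          intro a ha
          have := List.of_mem_filter ha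
          simp only [beq_iff_eq] at this
          simp [hx, this]),
        pvInsertBy_front _ _ _ (by
          intro y hy
          have := List.of_mem_filter ((PySem.List.mem_sorted _ _ _ _).mp hy)
          simp only [Bool.not_eq_true', beq_eq_false_iff_ne] at this
          simp [hx]
          omega)]
      simp
    · have hf0 : List.filter (fun y => y.1 == 0) [x] = [] := by simp [hx]
      have hfn : List.filter (fun y => !(y.1 == 0)) [x] = [x] := by simp [hx]
      rw [hf0, hfn, List.append_nil,
        pvInsertBy_append _ _ _ _ (by
          intro a ha
          have := List.of_mem_filter ha
          simp only [beq_iff_eq] at this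
          simp [this]),
        ← pvSorted_snoc]

theorem pvInsertBy_map_shift {β : Type} (x : Nat × β) (l : List (Nat × β)) :
    PySem.List.insertBy (fun a b => decide (a.1 < b.1)) (x.1 + 1, x.2)
        (l.map (fun y => (y.1 + 1, y.2))) =
      (PySem.List.insertBy (fun a b => decide (a.1 < b.1)) x l).map (fun y => (y.1 + 1, y.2)) := by
  induction l with
  | nil => rfl
  | cons y l ih =>
    simp only [List.map_cons, PySem.List.insertBy]
    by_cases hb : x.1 < y.1
    · simp [hb]
    · simp only [hb, decide_false]
      have hb' : ¬ (x.1 + 1 < y.1 + 1) := by omega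
      simp [hb', ih]

theorem pvSorted_map_shift {β : Type} (xs : List (Nat × β)) :
    PySem.List.sorted (xs.map (fun y => (y.1 + 1, y.2))) (fun y => y.1) false =
      (PySem.List.sorted xs (fun y => y.1) false).map (fun y => (y.1 + 1, y.2)) := by
  induction xs using List.reverseRecOn with
  | nil => rfl
  | append_singleton xs x ih =>
    rw [List.map_append, List.map_singleton, pvSorted_snoc, pvSorted_snoc, ih]
    exact pvInsertBy_map_shift x _

-- ---- scored-list facts ----

theorem pvScored_nil_fst (es : List (List (String × String)))
    (x : Nat × String × Option String × List (String × String)) (hx : x ∈ pvB_scored [] es) :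
    x.1 = 0 := by
  induction es with
  | nil => simp [pvB_scored] at hx
  | cons e r ih =>
    simp only [pvB_scored] at hx
    by_cases h : pvName e = ""
    · rw [if_pos h] at hx
      exact ih hx
    · rw [if_neg h] at hx
      rcases List.mem_cons.mp hx with h1 | h2
      · rw [h1]
        rfl
      · exact ih h2

theorem pvSorted_scored_nil (es : List (List (String × String))) :
    PySem.List.sorted (pvB_scored [] es) (fun y => y.1) false = pvB_scored [] es := by
  apply PySem.List.sorted_eq_self_of_pairwise
  apply List.pairwise_of_forall_mem_list
  intro a ha b hb
  rw [pvScored_nil_fst es a ha, pvScored_nil_fst es b hb]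

theorem pvDk_scored_nil (es : List (List (String × String))) (s : List (String × Option String)) :
    pvDk (pvB_scored [] es) s = pvFill es s := by
  induction es generalizing s with
  | nil => rfl
  | cons e r ih =>
    simp only [pvB_scored, pvFill]
    by_cases h : pvName e = ""
    · rw [if_pos h, if_pos (Or.inl h)]
      exact ih s
    · rw [if_neg h]
      simp only [pvDk, pvKey_eq]
      by_cases hk : pvKey e ∈ s
      · rw [if_pos hk, if_pos (Or.inr hk), ih]
      · rw [if_neg hk, if_neg (by simp [h, hk])]
        simp [ih]

set_option maxHeartbeats 1000000 in
theorem pvDk_filter0 (t : String) (ht : t ≠ "") (ts : List String) :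
    ∀ (es : List (List (String × String))) (s : List (String × Option String)),
      pvDk ((pvB_scored (t :: ts) es).filter (fun y => y.1 == 0)) s = pvGrab t es s := by
  intro es
  induction es with
  | nil => intro s; rfl
  | cons e r ih =>
    intro s
    simp only [pvB_scored]
    by_cases hn : pvName e = ""
    · rw [if_pos hn]
      conv_rhs => rw [pvGrab]
      by_cases hk : pvKey e ∈ s
      · rw [if_pos hk]
        exact ih s
      · rw [if_neg hk, if_neg (by simp [pvMatch_empty t ht e hn])]
        exact ih s
    · rw [if_neg hn]
      by_cases hm : pvMatch t e = true
      · have hm2 : PySem.Str.isIn t (PySem.Str.lower (pvName e)) = true := hm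
        simp only [pvB_score, hm2, if_true]
        rw [List.filter_cons_of_pos (by simp)]
        simp only [pvDk, pvKey_eq]
        conv_rhs => rw [pvGrab]
        by_cases hk : pvKey e ∈ s
        · rw [if_pos hk, if_pos hk]
          exact ih s
        · rw [if_neg hk, if_neg hk, if_pos hm, ih ((pvKey e) :: s)]
      · have hm2 : PySem.Str.isIn t (PySem.Str.lower (pvName e)) = false :=
          Bool.of_not_eq_true hm
        simp only [pvB_score, hm2, Bool.false_eq_true, if_false]
        rw [List.filter_cons_of_neg (by simp)]
        conv_rhs => rw [pvGrab]
        by_cases hk : pvKey e ∈ s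
        · rw [if_pos hk]
          exact ih s
        · rw [if_neg hk, if_neg hm]
          exact ih s

set_option maxHeartbeats 1000000 in
theorem pvScored_filterne (t : String) (ht : t ≠ "") (ts : List String)
    (es : List (List (String × String))) :
    (pvB_scored (t :: ts) es).filter (fun y => !(y.1 == 0)) =
      (pvB_scored ts (es.filter (fun e => !(pvMatch t e)))).map (fun y => (y.1 + 1, y.2)) := by
  induction es with
  | nil => rfl
  | cons e r ih =>
    simp only [pvB_scored]
    by_cases hn : pvName e = ""
    · rw [if_pos hn]
      have hmf : pvMatch t e = false := pvMatch_empty t ht e hn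
      rw [List.filter_cons_of_pos (by simp [hmf])]
      simp only [pvB_scored, if_pos hn]
      exact ih
    · rw [if_neg hn]
      by_cases hm : pvMatch t e = true
      · have hm2 : PySem.Str.isIn t (PySem.Str.lower (pvName e)) = true := hm
        simp only [pvB_score, hm2, if_true]
        rw [List.filter_cons_of_neg (by simp), List.filter_cons_of_neg (by simp [hm])]
        exact ih
      · have hm2 : PySem.Str.isIn t (PySem.Str.lower (pvName e)) = false :=
          Bool.of_not_eq_true hm
        simp only [pvB_score, hm2, Bool.false_eq_true, if_false]
        rw [List.filter_cons_of_pos (by simp), List.filter_cons_of_pos (by simp [hm])]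
        simp only [pvB_scored, if_neg hn, List.map_cons]
        rw [ih]

theorem pvDk_append (l1 l2 : List (Nat × String × Option String × List (String × String)))
    (s : List (String × Option String)) :
    pvDk (l1 ++ l2) s =
      ((pvDk l1 s).1 ++ (pvDk l2 (pvDk l1 s).2).1, (pvDk l2 (pvDk l1 s).2).2) := by
  induction l1 generalizing s with
  | nil => rfl
  | cons y l1 ih =>
    obtain ⟨p, n, i, e⟩ := y
    simp only [List.cons_append, pvDk]
    by_cases hk : (n, i) ∈ s
    · rw [if_pos hk, if_pos hk, ih]
    · rw [if_neg hk, if_neg hk]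
      simp [ih]

theorem pvDk_map_shift (l : List (Nat × String × Option String × List (String × String)))
    (s : List (String × Option String)) :
    pvDk (l.map (fun y => (y.1 + 1, y.2))) s = pvDk l s := by
  induction l generalizing s with
  | nil => rfl
  | cons y l ih =>
    obtain ⟨p, n, i, e⟩ := y
    simp only [List.map_cons, pvDk]
    by_cases hk : (n, i) ∈ s
    · rw [if_pos hk, if_pos hk, ih]
    · rw [if_neg hk, if_neg hk]
      simp [ih]

-- ---- uncapped-A (pvGs) facts ----

theorem pvGs_cons (t : String) (ht : t ≠ "") (ts : List String)
    (es : List (List (String × String))) (s : List (String × Option String)) :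
    pvGs (t :: ts) es s = (pvGrab t es s).1 ++ pvGs ts es (pvGrab t es s).2 := by
  unfold pvGs
  simp only [pvGsT, if_neg ht]
  simp [List.append_assoc]

theorem pvGrab_seen_mono (t : String) :
    ∀ (es : List (List (String × String))) (s : List (String × Option String))
      (k : String × Option String), k ∈ s → k ∈ (pvGrab t es s).2 := by
  intro es
  induction es with
  | nil => intro s k hk; exact hk
  | cons e r ih =>
    intro s k hk
    simp only [pvGrab]
    by_cases h1 : pvKey e ∈ s
    · rw [if_pos h1]; exact ih s k hk
    · rw [if_neg h1]
      by_cases h2 : pvMatch t e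
      · rw [if_pos h2]
        exact ih (pvKey e :: s) k (by simp [hk])
      · rw [if_neg h2]; exact ih s k hk

theorem pvGrab_match_seen (t : String) :
    ∀ (es : List (List (String × String))) (s : List (String × Option String))
      (e : List (String × String)), e ∈ es → pvMatch t e = true →
      pvKey e ∈ (pvGrab t es s).2 := by
  intro es
  induction es with
  | nil => intro s e h; simp at h
  | cons e0 r ih =>
    intro s e he hm
    simp only [pvGrab]
    rcases List.mem_cons.mp he with rfl | hr
    · by_cases h1 : pvKey e ∈ s
      · rw [if_pos h1]; exact pvGrab_seen_mono t r s _ h1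
      · rw [if_neg h1, if_pos hm]
        exact pvGrab_seen_mono t r _ _ (by simp)
    · by_cases h1 : pvKey e0 ∈ s
      · rw [if_pos h1]; exact ih s e hr hm
      · rw [if_neg h1]
        by_cases h2 : pvMatch t e0
        · rw [if_pos h2]; exact ih (pvKey e0 :: s) e hr hm
        · rw [if_neg h2]; exact ih s e hr hm

theorem pvGsT_seen_mono (ts : List String) :
    ∀ (es : List (List (String × String))) (s : List (String × Option String))
      (k : String × Option String), k ∈ s → k ∈ (pvGsT ts es s).2 := by
  induction ts with
  | nil => intro es s k hk; exact hk
  | cons t ts ih =>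
    intro es s k hk
    simp only [pvGsT]
    by_cases h : t = ""
    · rw [if_pos h]; exact ih es s k hk
    · rw [if_neg h]
      exact ih es _ k (pvGrab_seen_mono t es s k hk)

theorem pvGrab_filter (t : String) (P : List (String × String) → Bool) :
    ∀ (es : List (List (String × String))) (s : List (String × Option String)),
      (∀ e ∈ es, P e = false → pvKey e ∈ s) →
      pvGrab t (es.filter P) s = pvGrab t es s := by
  intro es
  induction es with
  | nil => intro s _; rfl
  | cons e r ih =>
    intro s hP
    by_cases hp : P e
    · rw [List.filter_cons_of_pos hp]
      simp only [pvGrab]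
      by_cases h1 : pvKey e ∈ s
      · rw [if_pos h1, if_pos h1]
        exact ih s (fun e' he' => hP e' (by simp [he']))
      · rw [if_neg h1, if_neg h1]
        by_cases h2 : pvMatch t e
        · rw [if_pos h2, if_pos h2,
            ih (pvKey e :: s) (fun e' he' hf => by simp [hP e' (by simp [he']) hf])]
        · rw [if_neg h2, if_neg h2]
          exact ih s (fun e' he' => hP e' (by simp [he']))
    · rw [List.filter_cons_of_neg hp]
      have hk : pvKey e ∈ s := hP e (by simp) (by simpa using hp)
      conv_rhs => rw [pvGrab]
      rw [if_pos hk]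
      exact ih s (fun e' he' => hP e' (by simp [he']))

theorem pvFill_filter (P : List (String × String) → Bool) :
    ∀ (es : List (List (String × String))) (s : List (String × Option String)),
      (∀ e ∈ es, P e = false → pvKey e ∈ s) →
      pvFill (es.filter P) s = pvFill es s := by
  intro es
  induction es with
  | nil => intro s _; rfl
  | cons e r ih =>
    intro s hP
    by_cases hp : P e
    · rw [List.filter_cons_of_pos hp]
      simp only [pvFill]
      by_cases h1 : pvName e = "" ∨ pvKey e ∈ s
      · rw [if_pos h1, if_pos h1]
        exact ih s (fun e' he' => hP e' (by simp [he']))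
      · rw [if_neg h1, if_neg h1,
          ih (pvKey e :: s) (fun e' he' hf => by simp [hP e' (by simp [he']) hf])]
    · rw [List.filter_cons_of_neg hp]
      have hk : pvKey e ∈ s := hP e (by simp) (by simpa using hp)
      conv_rhs => rw [pvFill]
      rw [if_pos (Or.inr hk)]
      exact ih s (fun e' he' => hP e' (by simp [he']))

theorem pvGs_filter (P : List (String × String) → Bool) :
    ∀ (ts : List String) (es : List (List (String × String)))
      (s : List (String × Option String)),
      (∀ e ∈ es, P e = false → pvKey e ∈ s) →
      pvGs ts (es.filter P) s = pvGs ts es s := by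
  have hT : ∀ (ts : List String) (es : List (List (String × String)))
      (s : List (String × Option String)),
      (∀ e ∈ es, P e = false → pvKey e ∈ s) →
      pvGsT ts (es.filter P) s = pvGsT ts es s := by
    intro ts
    induction ts with
    | nil => intro es s _; rfl
    | cons t ts ih =>
      intro es s hP
      simp only [pvGsT]
      by_cases h : t = ""
      · rw [if_pos h, if_pos h]
        exact ih es s hP
      · rw [if_neg h, if_neg h, pvGrab_filter t P es s hP,
          ih es _ (fun e' he' hf => pvGrab_seen_mono t es s _ (hP e' he' hf))]
  intro ts es s hP
  unfold pvGs
  rw [hT ts es s hP,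
    pvFill_filter P es _ (fun e' he' hf => pvGsT_seen_mono ts es s _ (hP e' he' hf))]

theorem pvGs_filter_tokens (ts : List String) (es : List (List (String × String)))
    (s : List (String × Option String)) :
    pvGs ts es s = pvGs (ts.filter (fun t => t ≠ "")) es s := by
  have hT : ∀ (ts : List String) (es : List (List (String × String)))
      (s : List (String × Option String)),
      pvGsT ts es s = pvGsT (ts.filter (fun t => t ≠ "")) es s := by
    intro ts
    induction ts with
    | nil => intro es s; rfl
    | cons t ts ih =>
      intro es s
      by_cases h : t = ""
      · rw [List.filter_cons_of_neg (by simp [h])]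
        simp only [pvGsT, if_pos h]
        exact ih es s
      · rw [List.filter_cons_of_pos (by simp [h])]
        simp only [pvGsT, if_neg h]
        rw [ih es _]
  unfold pvGs
  rw [hT ts es s]

-- ---- the main equivalence of the two uncapped runs ----

theorem pvMain :
    ∀ (toks : List String) (es : List (List (String × String)))
      (s : List (String × Option String)),
      (∀ t ∈ toks, t ≠ "") →
      pvGs toks es s =
        (pvDk (PySem.List.sorted (pvB_scored toks es) (fun y => y.1) false) s).1 := by
  intro toks
  induction toks with
  | nil =>
    intro es s _
    rw [pvSorted_scored_nil, pvDk_scored_nil]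
    unfold pvGs
    simp [pvGsT]
  | cons t ts ih =>
    intro es s htoks
    have ht : t ≠ "" := htoks t (by simp)
    have hts : ∀ t' ∈ ts, t' ≠ "" := fun t' h => htoks t' (by simp [h])
    rw [pvGs_cons t ht ts es s, pvSorted_decomp, pvDk_append, pvDk_filter0 t ht ts es s,
      pvScored_filterne t ht ts es, pvSorted_map_shift, pvDk_map_shift,
      ← ih (es.filter (fun e => !(pvMatch t e))) ((pvGrab t es s).2) hts]
    simp only []
    congr 1
    rw [pvGs_filter (fun e => !(pvMatch t e)) ts es ((pvGrab t es s).2)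
      (fun e he hf => pvGrab_match_seen t es s e he (by simpa using hf))]

-- ===== VERDICT (by name: the statement is the Claim_ definition above) =====
theorem pick_thread_entries_py_spec : Claim_equal_pick_thread_entries_py := by
  intro entries pts limit _hdom hpre
  unfold Spec_pick_thread_entries_py
  have hl : 1 ≤ limit := hpre
  rw [pvA_run entries pts limit hl, pvB_run entries pts limit hl,
    pvGs_filter_tokens, pvMain]
  intro t htm
  have := List.of_mem_filter htm
  simpa using this
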